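-- pv_equiv track=rewrite | github.com/irs1318dev/irsScouting2017 | server/view/graphing.py | combine_tasks
-- ===== SOURCE A (Python) =====
-- def combine_tasks(all_data_cols):
-- 	combined_data = list()
-- 	max_count = 0
-- 	for col in all_data_cols:
-- 		max_count = max(max_count, len(col))
--
-- 	if len(all_data_cols) > 0:
-- 		for i in range(max_count):
-- 			for col in all_data_cols:
-- 				if i < len(col):
-- 					combined_data.append(col[i])
-- 	return combined_data
-- ===== SOURCE B (Python) =====
-- def combine_tasks(all_data_cols):
--     # Column-major single pass: scatter each element into its row bucket,
--     # then concatenate the buckets (no per-row rescan of the columns).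
--     buckets = []
--     for col in all_data_cols:
--         for i, x in enumerate(col):
--             if i == len(buckets):
--                 buckets.append([])
--             buckets[i].append(x)
--     return [x for bucket in buckets for x in bucket]
-- ===== Notes on version B (the rewrite author's own statement) =====
-- stated objective: alternative
-- what changed: B makes one column-major pass, scattering each element into a per-row bucket list, then concatenates the buckets, instead of A's row-major loop that rescans every column for every row index up to max_count.
import Mathlib
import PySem

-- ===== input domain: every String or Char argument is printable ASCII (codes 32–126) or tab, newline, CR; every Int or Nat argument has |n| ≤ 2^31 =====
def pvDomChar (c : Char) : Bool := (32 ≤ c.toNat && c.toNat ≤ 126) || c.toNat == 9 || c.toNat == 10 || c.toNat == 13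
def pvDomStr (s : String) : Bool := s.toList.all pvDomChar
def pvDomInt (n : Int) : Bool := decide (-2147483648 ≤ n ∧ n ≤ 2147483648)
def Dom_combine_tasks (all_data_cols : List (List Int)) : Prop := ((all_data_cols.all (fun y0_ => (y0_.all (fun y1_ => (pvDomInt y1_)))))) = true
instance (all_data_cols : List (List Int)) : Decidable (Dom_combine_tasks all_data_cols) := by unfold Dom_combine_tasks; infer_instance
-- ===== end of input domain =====

-- B makes one column-major pass scattering each element into a per-row bucket,
-- then concatenates the buckets, instead of A's row-major rescan of all columns
-- for every row index (objective: alternative).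

-- ===== PORT A =====
def combine_tasks (all_data_cols : List (List Int)) : List Int :=
  let combined_data : List Int := []
  let max_count : Int := all_data_cols.foldl (fun m col => max m (col.length : Int)) 0
  if 0 < all_data_cols.length then
    (PySem.List.pyRange 0 max_count 1).foldl
      (fun acc i =>
        all_data_cols.foldl
          (fun acc col =>
            if i < (col.length : Int) then acc ++ [PySem.List.pyGetD col i 0] else acc)
          acc)
      combined_data
  else combined_data

-- ===== PORT B =====
-- `if i == len(buckets): buckets.append([])` then `buckets[i].append(x)`
def bput (bs : List (List Int)) (i : Nat) (x : Int) : List (List Int) :=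
  let bs' := if i = bs.length then bs ++ [[]] else bs
  bs'.set i (bs'.getD i [] ++ [x])

-- the inner `for i, x in enumerate(col)` loop
def putColAux (bs : List (List Int)) (i : Nat) (col : List Int) : List (List Int) :=
  match col with
  | [] => bs
  | x :: rest => putColAux (bput bs i x) (i + 1) rest

def combine_tasks_alt (all_data_cols : List (List Int)) : List Int :=
  (all_data_cols.foldl (fun bs col => putColAux bs 0 col) []).flatten

-- ===== PRECONDITION & SPEC =====
def Spec_combine_tasks (all_data_cols : List (List Int)) (out : List Int) : Prop := out = combine_tasks_alt all_data_cols
instance (all_data_cols : List (List Int)) (out : List Int) : Decidable (Spec_combine_tasks all_data_cols out) := by unfold Spec_combine_tasks; infer_instance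

-- ===== CLAIM =====
def Claim_equal_combine_tasks : Prop := ∀ (all_data_cols : List (List Int)), Dom_combine_tasks all_data_cols → Spec_combine_tasks all_data_cols (combine_tasks all_data_cols)

-- ===== LEMMAS AND PROOFS =====

-- round k's contribution: the k-th element of every column long enough, in column order
def pvRound (k : Nat) (cols : List (List Int)) : List Int :=
  (cols.filter (fun c => decide (k < c.length))).map (fun c => c.getD k 0)

def pvMaxLen (cols : List (List Int)) : Nat :=
  cols.foldl (fun m c => max m c.length) 0

lemma pvMaxCount_cast (cols : List (List Int)) (m : Nat) :
    cols.foldl (fun a c => max a (c.length : Int)) (m : Int)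
      = ((cols.foldl (fun a c => max a c.length) m : Nat) : Int) := by
  induction cols generalizing m with
  | nil => simp
  | cons c rest ih =>
    simp only [List.foldl_cons]
    rw [← Nat.cast_max, ih]

lemma pvFoldl_step {α β : Type} (l : List β) (f : List α → β → List α) (g : β → List α)
    (h : ∀ acc k, k ∈ l → f acc k = acc ++ g k) :
    ∀ init : List α, l.foldl f init = init ++ l.flatMap g := by
  induction l with
  | nil => intro init; simp
  | cons b t ih =>
    intro init
    rw [List.foldl_cons, h init b (by simp),
      ih (fun acc k hk => h acc k (by simp [hk])) (init ++ g b)]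
    simp

lemma pvA_eval (cols : List (List Int)) :
    combine_tasks cols = (List.range (pvMaxLen cols)).flatMap (fun k => pvRound k cols) := by
  cases cols with
  | nil => simp [combine_tasks, pvMaxLen]
  | cons c0 rest =>
    unfold combine_tasks
    simp only [List.length_cons, Nat.zero_lt_succ, if_pos]
    rw [show ((c0 :: rest).foldl (fun m col => max m (col.length : Int)) 0)
          = ((pvMaxLen (c0 :: rest) : Nat) : Int) from pvMaxCount_cast (c0 :: rest) 0,
      PySem.List.pyRange_zero_natCast, List.foldl_map]
    have hstep : ∀ (k : Nat) (acc : List Int),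
        (c0 :: rest).foldl
          (fun acc col =>
            if (k : Int) < (col.length : Int) then acc ++ [PySem.List.pyGetD col (k : Int) 0] else acc)
          acc
        = acc ++ pvRound k (c0 :: rest) := by
      intro k acc
      rw [PySem.List.foldl_append_ite]
      unfold pvRound
      have hfil : (c0 :: rest).filter (fun c => decide ((k : Int) < (c.length : Int)))
          = (c0 :: rest).filter (fun c => decide (k < c.length)) := by
        apply List.filter_congr; intro c hc; simp
      rw [hfil]
      congr 1
      apply List.map_congr_left
      intro c hc
      exact PySem.List.pyGetD_natCast c k 0
    rw [pvFoldl_step _ _ (fun k => pvRound k (c0 :: rest)) (fun acc k _ => hstep k acc) []]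
    simp

-- getD of a set, for the bucket update
lemma pvGetD_set (l : List (List Int)) (i k : Nat) (v : List Int) (hi : i < l.length) :
    (l.set i v).getD k [] = if k = i then v else l.getD k [] := by
  simp only [List.getD_eq_getElem?_getD, List.getElem?_set]
  by_cases h : k = i
  · subst h; simp [hi]
  · simp only [if_neg h, if_neg (fun hh => h (Eq.symm hh))]

lemma pvBput_length (bs : List (List Int)) (i : Nat) (x : Int) (h : i ≤ bs.length) :
    (bput bs i x).length = max bs.length (i + 1) := by
  unfold bput
  by_cases hi : i = bs.length
  · simp [hi]
  · have : i < bs.length := lt_of_le_of_ne h hi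
    simp [hi]; omega

lemma pvBput_getD (bs : List (List Int)) (i : Nat) (x : Int) (k : Nat) (h : i ≤ bs.length) :
    (bput bs i x).getD k [] = bs.getD k [] ++ (if k = i then [x] else []) := by
  unfold bput
  by_cases hi : i = bs.length
  · subst hi
    rw [if_pos rfl, pvGetD_set _ _ _ _ (by simp)]
    have hbl : (bs ++ [[]]).getD bs.length [] = [] := by
      simp [List.getD_eq_getElem?_getD]
    by_cases hk : k = bs.length
    · rw [if_pos hk, if_pos hk, hbl]
      subst hk
      simp [List.getD_eq_getElem?_getD]
    · rw [if_neg hk, if_neg hk]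
      simp only [List.getD_eq_getElem?_getD]
      by_cases hlt : k < bs.length
      · rw [List.getElem?_append_left hlt]
        simp
      · have h1 : bs[k]? = none := List.getElem?_eq_none (by omega)
        have h2 : (bs ++ [[]])[k]? = none := List.getElem?_eq_none (by simp; omega)
        rw [h1, h2]
        simp
  · have hlt : i < bs.length := lt_of_le_of_ne h hi
    rw [if_neg hi, pvGetD_set _ _ _ _ hlt]
    by_cases hk : k = i <;> simp [hk]

lemma pvPutColAux_length (col : List Int) :
    ∀ (bs : List (List Int)) (i : Nat), i ≤ bs.length →
      (putColAux bs i col).length = max bs.length (i + col.length) := by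
  induction col with
  | nil => intro bs i h; simp [putColAux]; omega
  | cons x rest ih =>
    intro bs i h
    simp only [putColAux]
    rw [ih (bput bs i x) (i + 1) (by rw [pvBput_length bs i x h]; omega),
      pvBput_length bs i x h]
    simp only [List.length_cons]
    omega

lemma pvPutColAux_getD (col : List Int) :
    ∀ (bs : List (List Int)) (i : Nat), i ≤ bs.length → ∀ k,
      (putColAux bs i col).getD k []
        = bs.getD k [] ++ (if i ≤ k ∧ k < i + col.length then [col.getD (k - i) 0] else []) := by
  induction col with
  | nil =>
    intro bs i h k
    simp only [putColAux, List.length_nil, Nat.add_zero]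
    rw [if_neg (by omega)]
    simp
  | cons x rest ih =>
    intro bs i h k
    simp only [putColAux]
    rw [ih (bput bs i x) (i + 1) (by rw [pvBput_length bs i x h]; omega) k,
      pvBput_getD bs i x k h, List.append_assoc]
    congr 1
    simp only [List.length_cons]
    by_cases hk : k = i
    · rw [if_pos hk, if_neg (by omega), if_pos (by omega)]
      subst hk
      simp
    · rw [if_neg hk]
      by_cases h1 : i + 1 ≤ k ∧ k < i + 1 + rest.length
      · rw [if_pos h1, if_pos (by omega), show k - i = (k - (i + 1)) + 1 by omega]
        simp
      · rw [if_neg h1, if_neg (by omega)]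
        simp

lemma pvRound_cons (k : Nat) (c : List Int) (rest : List (List Int)) :
    pvRound k (c :: rest)
      = (if k < c.length then [c.getD k 0] else []) ++ pvRound k rest := by
  unfold pvRound
  rw [List.filter_cons]
  by_cases h : k < c.length <;> simp [h]

lemma pvMaxLen_foldl (cols : List (List Int)) (m : Nat) :
    cols.foldl (fun a c => max a c.length) m = max m (pvMaxLen cols) := by
  induction cols generalizing m with
  | nil => simp [pvMaxLen]
  | cons c rest ih =>
    simp only [List.foldl_cons, pvMaxLen] at *
    rw [ih (max m c.length), ih (max 0 c.length)]
    omega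

lemma pvOuter (cols : List (List Int)) :
    ∀ bs : List (List Int),
      (cols.foldl (fun bs col => putColAux bs 0 col) bs).length = max bs.length (pvMaxLen cols)
      ∧ ∀ k, (cols.foldl (fun bs col => putColAux bs 0 col) bs).getD k []
          = bs.getD k [] ++ pvRound k cols := by
  induction cols with
  | nil =>
    intro bs
    refine ⟨by simp [pvMaxLen], fun k => by simp [pvRound]⟩
  | cons c rest ih =>
    intro bs
    simp only [List.foldl_cons]
    obtain ⟨ihl, ihg⟩ := ih (putColAux bs 0 c)
    constructor
    · rw [ihl, pvPutColAux_length c bs 0 (by omega)]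
      have : pvMaxLen (c :: rest) = max c.length (pvMaxLen rest) := by
        rw [show pvMaxLen (c :: rest)
              = List.foldl (fun m c => max m c.length) (max 0 c.length) rest from rfl,
          pvMaxLen_foldl]
        omega
      omega
    · intro k
      rw [ihg k, pvPutColAux_getD c bs 0 (by omega) k, pvRound_cons, List.append_assoc]
      congr 2
      by_cases h : k < c.length
      · rw [if_pos (by omega), if_pos h]; simp
      · rw [if_neg (by omega), if_neg h]

lemma pvFlatten_eq (bs : List (List Int)) :
    bs.flatten = (List.range bs.length).flatMap (fun k => bs.getD k []) := by
  induction bs with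
  | nil => simp
  | cons b t ih =>
    rw [List.flatten_cons, ih, List.length_cons, List.range_succ_eq_map]
    simp [List.flatMap_map]

-- ===== VERDICT =====
theorem combine_tasks_spec : Claim_equal_combine_tasks := by
  intro cols _
  unfold Spec_combine_tasks combine_tasks_alt
  obtain ⟨hl, hg⟩ := pvOuter cols []
  rw [pvA_eval, pvFlatten_eq, hl]
  simp only [List.length_nil, Nat.zero_max]
  apply List.flatMap_congr
  intro k hk
  rw [hg k]
  simp
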